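-- pv_equiv track=rewrite | github.com/jacquestkirk/CommuteTimes | CommuteTimes.py | buildArgumentString
-- ===== SOURCE A (Python) =====
-- def buildArgumentString(argumentList):
--
--     argumentString = ""
--
--     for i in range(len(argumentList)):
--         arg = argumentList[i]
--
--         argumentString += arg.replace(" ", "+")
--
--         if (i != len(argumentList)-1):
--             argumentString += "|"
--
--     return argumentString
-- ===== SOURCE B (Python) =====
-- def buildArgumentString(argumentList):
--     return "|".join(argumentList).replace(" ", "+")
-- ===== Notes on version B (the rewrite author's own statement) =====
-- stated objective: simpler
-- what changed: Replaces the index loop that appends each element's space-to-plus replacement plus a conditional separator with a single '|'-join of the whole list followed by one global space-to-plus replace (the separator contains no spaces, so the one-shot replace touches the same characters).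
import Mathlib
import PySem

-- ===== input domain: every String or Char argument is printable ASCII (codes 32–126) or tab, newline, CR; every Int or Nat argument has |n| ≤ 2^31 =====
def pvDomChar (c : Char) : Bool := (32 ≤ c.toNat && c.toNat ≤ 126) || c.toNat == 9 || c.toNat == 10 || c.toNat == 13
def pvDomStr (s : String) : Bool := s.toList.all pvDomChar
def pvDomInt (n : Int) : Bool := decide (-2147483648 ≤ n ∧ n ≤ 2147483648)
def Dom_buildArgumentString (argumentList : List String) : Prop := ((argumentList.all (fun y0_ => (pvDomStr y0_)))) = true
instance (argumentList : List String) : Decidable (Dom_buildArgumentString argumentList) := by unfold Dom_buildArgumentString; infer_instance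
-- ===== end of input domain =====

-- B joins the whole list with "|" first and then does ONE global " "→"+" replace, instead of
-- A's index loop that replaces inside each element and conditionally appends the separator.

-- ===== PORT A =====
-- Literal port of A's index loop; the string accumulator is kept as a List Char (code points),
-- which is exact, and wrapped back with String.ofList at the end.
def buildArgumentString (argumentList : List String) : String :=
  String.ofList <|
    (PySem.List.pyRange 0 (argumentList.length : Int) 1).foldl
      (fun argumentString i =>
        let arg := PySem.List.pyGetD argumentList i ""
        let argumentString := argumentString ++ PySem.Chars.replace arg.toList " ".toList "+".toList
        if i ≠ (argumentList.length : Int) - 1 then argumentString ++ "|".toList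
        else argumentString)
      []

-- ===== PORT B =====
def buildArgumentString_alt (argumentList : List String) : String :=
  PySem.Str.replace (PySem.Str.join "|" argumentList) " " "+"

-- ===== PRECONDITION & SPEC =====
def Spec_buildArgumentString (argumentList : List String) (out : String) : Prop := out = buildArgumentString_alt argumentList
instance (argumentList : List String) (out : String) : Decidable (Spec_buildArgumentString argumentList out) := by unfold Spec_buildArgumentString; infer_instance

-- ===== CLAIM (what is proved, stated in full; the proofs are below) =====
def Claim_equal_buildArgumentString : Prop := ∀ (argumentList : List String), Dom_buildArgumentString argumentList → Spec_buildArgumentString argumentList (buildArgumentString argumentList)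

-- ===== LEMMAS AND PROOFS =====

-- space→plus as a character map
def pvSp (c : Char) : Char := if c = ' ' then '+' else c

-- replacing the single character ' ' by the single character '+' is a character map
theorem pvReplaceGo_map (fuel : Nat) : ∀ (l acc : List Char), l.length ≤ fuel →
    PySem.Chars.replace.go [' '] ['+'] fuel l acc = acc.reverse ++ l.map pvSp := by
  induction fuel with
  | zero =>
      intro l acc h
      have : l = [] := List.eq_nil_of_length_eq_zero (Nat.le_zero.mp h)
      subst this
      simp [PySem.Chars.replace.go]
  | succ fuel ih =>
      intro l acc h
      cases l with
      | nil => simp [PySem.Chars.replace.go]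
      | cons c t =>
          by_cases hc : c = ' '
          · subst hc
            have hp : [' '].isPrefixOf (' ' :: t) = true := by simp [List.isPrefixOf]
            simp only [PySem.Chars.replace.go, hp, if_true]
            rw [show List.drop [' '].length (' ' :: t) = t from rfl,
                show (['+'].reverse ++ acc : List Char) = '+' :: acc from rfl,
                ih t ('+' :: acc) (by simpa using Nat.le_of_succ_le_succ h)]
            simp [pvSp]
          · have hp : [' '].isPrefixOf (c :: t) = false := by
              simp [List.isPrefixOf]
              exact fun h => hc h.symm
            simp only [PySem.Chars.replace.go, hp, Bool.false_eq_true, if_false]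
            rw [ih t (c :: acc) (by simpa using Nat.le_of_succ_le_succ h)]
            simp [pvSp, hc]

theorem pvReplace_space (cs : List Char) :
    PySem.Chars.replace cs [' '] ['+'] = cs.map pvSp := by
  have : PySem.Chars.replace cs [' '] ['+']
      = PySem.Chars.replace.go [' '] ['+'] cs.length cs [] := by
    simp [PySem.Chars.replace]
  rw [this, pvReplaceGo_map cs.length cs [] (le_refl _)]
  simp

-- pvSp leaves '|' alone, so it commutes with the '|'-join
theorem pvMap_join (parts : List (List Char)) :
    (PySem.Chars.join ['|'] parts).map pvSp
      = PySem.Chars.join ['|'] (parts.map (List.map pvSp)) := by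
  induction parts with
  | nil => simp [PySem.Chars.join_nil]
  | cons p rest ih =>
      cases rest with
      | nil => simp [PySem.Chars.join_singleton]
      | cons q r =>
          rw [PySem.Chars.join_cons_cons]
          simp only [List.map_cons] at ih ⊢
          rw [PySem.Chars.join_cons_cons, ← ih]
          simp [pvSp]

-- the indexed loop body, already in "append g i" form, equals the '|'-join of the mapped pieces
theorem pvCore : ∀ (xs : List (List Char)),
    (List.range xs.length).flatMap
        (fun k => (xs.getD k []).map pvSp
          ++ (if (k : Int) ≠ (xs.length : Int) - 1 then ['|'] else []))
      = PySem.Chars.join ['|'] (xs.map (List.map pvSp)) := by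
  intro xs
  induction xs with
  | nil => simp [PySem.Chars.join_nil]
  | cons y t ih =>
      rw [List.length_cons, List.range_succ_eq_map, List.flatMap_cons, List.flatMap_map]
      have hfun : (fun k : Nat =>
            ((y :: t).getD (Nat.succ k) []).map pvSp
              ++ (if ((Nat.succ k : Nat) : Int) ≠ ((t.length + 1 : Nat) : Int) - 1 then ['|'] else []))
          = (fun k : Nat =>
            (t.getD k []).map pvSp
              ++ (if (k : Int) ≠ (t.length : Int) - 1 then ['|'] else [])) := by
        funext k
        have hiff : (((Nat.succ k : Nat) : Int) ≠ ((t.length + 1 : Nat) : Int) - 1)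
            ↔ ((k : Int) ≠ (t.length : Int) - 1) := by push_cast; omega
        rw [if_congr hiff rfl rfl]
        rfl
      rw [hfun, ih]
      cases t with
      | nil => simp [PySem.Chars.join_singleton, PySem.Chars.join_nil]
      | cons b r =>
          simp only [List.map_cons]
          rw [PySem.Chars.join_cons_cons]
          have : ((0 : Nat) : Int) ≠ (((b :: r).length + 1 : Nat) : Int) - 1 := by
            push_cast; simp; omega
          rw [if_pos this]
          simp

-- ===== VERDICT (by name: the statement is the Claim_ definition above) =====
theorem buildArgumentString_spec : Claim_equal_buildArgumentString := by
  intro xs _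
  unfold Spec_buildArgumentString buildArgumentString buildArgumentString_alt
  apply String.toList_inj.mp
  rw [String.toList_ofList, PySem.Str.toList_replace, PySem.Str.toList_join]
  -- rewrite A's loop body into "acc ++ g i" form
  have hbody : (fun (argumentString : List Char) (i : Int) =>
        let arg := PySem.List.pyGetD xs i ""
        let argumentString := argumentString ++ PySem.Chars.replace arg.toList " ".toList "+".toList
        if i ≠ (xs.length : Int) - 1 then argumentString ++ "|".toList else argumentString)
      = (fun (acc : List Char) (i : Int) => acc
          ++ (PySem.Chars.replace (PySem.List.pyGetD xs i "").toList " ".toList "+".toList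
              ++ (if i ≠ (xs.length : Int) - 1 then ['|'] else []))) := by
    funext acc i
    by_cases h : i ≠ (xs.length : Int) - 1 <;> simp [h]
  rw [hbody, PySem.List.foldl_append_eq_flatMap, List.nil_append,
      PySem.List.pyRange_zero_natCast, List.flatMap_map]
  have hg : (fun k : Nat =>
        PySem.Chars.replace (PySem.List.pyGetD xs ((k : Nat) : Int) "").toList " ".toList "+".toList
          ++ (if ((k : Nat) : Int) ≠ (xs.length : Int) - 1 then ['|'] else []))
      = (fun k : Nat =>
        ((xs.map String.toList).getD k []).map pvSp
          ++ (if (k : Int) ≠ ((xs.map String.toList).length : Int) - 1 then ['|'] else [])) := by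
    funext k
    rw [PySem.List.pyGetD_natCast]
    have hget : (xs.getD k "").toList = (xs.map String.toList).getD k [] := by
      by_cases hk : k < xs.length
      · simp [hk]
      · rw [List.getD_eq_default _ _ (by omega), List.getD_eq_default _ _ (by simpa using hk)]
        rfl
    rw [show " ".toList = [' '] from rfl, show "+".toList = ['+'] from rfl,
        pvReplace_space, hget]
    simp
  rw [hg, show xs.length = (xs.map String.toList).length from by simp]
  rw [pvCore, ← pvMap_join]
  show List.map pvSp (PySem.Chars.join ['|'] (List.map String.toList xs))
      = PySem.Chars.replace (PySem.Chars.join ['|'] (List.map String.toList xs)) [' '] ['+']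
  rw [pvReplace_space]
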